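-- pv_equiv track=rewrite | github.com/JTibs18/LeetCode | CountNicePairsInAnArray.py | countNicePairs
-- ===== SOURCE A (Python) =====
-- def countNicePairs(nums):
--     sumOfNumAndRev = dict()
--     count = 0
--
--     for i in nums:
--         rev = str(i)[::-1]
--         sumOfNum = int(rev) - i
--
--         if sumOfNum in sumOfNumAndRev:
--             sumOfNumAndRev[sumOfNum] += 1
--         else:
--             sumOfNumAndRev[sumOfNum] = 1
--
--     for i in sumOfNumAndRev.values():
--         if i > 1:
--             count += (i * (i - 1)) // 2
--
--     return count % (10 ** 9 + 7)
--
-- nums = [13, 10, 35, 24, 76]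
-- ===== SOURCE B (Python) =====
-- def countNicePairs(nums):
--     seen = {}
--     total = 0
--     for i in nums:
--         key = int(str(i)[::-1]) - i
--         c = seen.get(key, 0)
--         total += c
--         seen[key] = c + 1
--     return total % (10 ** 9 + 7)
-- ===== Notes on version B (the rewrite author's own statement) =====
-- stated objective: simpler
-- what changed: Replaces A's two-phase structure (build a full counter dict, then a second loop turning each group size k into k*(k-1)//2) with a single incremental pass that, for each number, adds the number of previously seen elements with the same rev(i)-i key to a running total.
import Mathlib
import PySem

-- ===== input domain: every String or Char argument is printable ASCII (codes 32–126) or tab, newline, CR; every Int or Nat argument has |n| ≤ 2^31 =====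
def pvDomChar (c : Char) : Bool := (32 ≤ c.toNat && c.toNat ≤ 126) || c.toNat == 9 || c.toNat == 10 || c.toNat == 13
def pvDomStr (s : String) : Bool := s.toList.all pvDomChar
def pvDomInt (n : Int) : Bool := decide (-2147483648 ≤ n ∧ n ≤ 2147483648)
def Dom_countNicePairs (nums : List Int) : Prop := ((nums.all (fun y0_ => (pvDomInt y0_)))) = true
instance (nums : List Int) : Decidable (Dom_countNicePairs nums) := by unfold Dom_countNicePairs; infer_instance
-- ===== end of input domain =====

-- B replaces A's build-counter-then-apply-k*(k-1)//2 two-loop structure with one incremental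
-- pass accumulating, per element, the count of earlier elements with the same rev(i)-i key
-- (objective: simpler; same return value on Pre_).

-- ===== PORT A =====
-- key = int(str(i)[::-1]) - i, the sub-expression both Pythons compute identically
def pvRevKey (i : Int) : Int :=
  ((PySem.Int.ofStr? ((PySem.Str.slice? (PySem.Int.toStr i) none none (-1)).getD "")).getD 0) - i

-- A's first loop body: 'if sumOfNum in d: d[sumOfNum] += 1 else: d[sumOfNum] = 1'
def pvStepA (d : PySem.Dict Int Int) (sumOfNum : Int) : PySem.Dict Int Int :=
  if d.contains sumOfNum then d.modify sumOfNum 0 (· + 1) else d.insert sumOfNum 1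

def countNicePairs (nums : List Int) : Int :=
  PySem.Int.mod
    (((nums.foldl (fun d i => pvStepA d (pvRevKey i)) PySem.Dict.empty).values).foldl
      (fun count v => if v > 1 then count + PySem.Int.floordiv (v * (v - 1)) 2 else count) 0)
    (10 ^ 9 + 7)

-- ===== PORT B =====
-- B's loop body: 'c = seen.get(key, 0); total += c; seen[key] = c + 1'
def pvStepB (st : PySem.Dict Int Int × Int) (key : Int) : PySem.Dict Int Int × Int :=
  (st.1.insert key (st.1.getD key 0 + 1), st.2 + st.1.getD key 0)

def countNicePairs_alt (nums : List Int) : Int :=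
  PySem.Int.mod
    ((nums.foldl (fun st i => pvStepB st (pvRevKey i)) (PySem.Dict.empty, 0)).2)
    (10 ^ 9 + 7)

-- ===== PRECONDITION & SPEC =====
-- A raises ValueError on any negative element (int("…-") on the reversed sign), so Pre_
-- admits exactly the lists of non-negative integers.
def Pre_countNicePairs (nums : List Int) : Prop := ∀ i ∈ nums, 0 ≤ i
instance (nums : List Int) : Decidable (Pre_countNicePairs nums) := by unfold Pre_countNicePairs; infer_instance

def pvWitness_countNicePairs : List Int := [13, 10, 35, 24, 76]

def Spec_countNicePairs (nums : List Int) (out : Int) : Prop := out = countNicePairs_alt nums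
instance (nums : List Int) (out : Int) : Decidable (Spec_countNicePairs nums out) := by unfold Spec_countNicePairs; infer_instance

-- ===== CLAIM (what is proved, stated in full; the proofs are below) =====
def Claim_equal_countNicePairs : Prop := ∀ (nums : List Int), Dom_countNicePairs nums → Pre_countNicePairs nums → Spec_countNicePairs nums (countNicePairs nums)

-- ===== LEMMAS AND PROOFS =====

-- C(v,2) contribution of one group of size v, as A computes it
def pvC2 (v : Int) : Int := if v > 1 then PySem.Int.floordiv (v * (v - 1)) 2 else 0

-- the common value: sum of C(count,2) over the distinct keys
def pvT (ks : List Int) : Int :=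
  ((PySem.Set.ofList ks).map (fun k => pvC2 ((ks.count k : Int)))).sum

lemma pvC2_succ (c : Int) (hc : 1 ≤ c) : pvC2 (c + 1) = pvC2 c + c := by
  rcases eq_or_lt_of_le hc with h1 | h2
  · rw [← h1]; decide
  · unfold pvC2
    rw [if_pos (by omega), if_pos (by omega),
        PySem.Int.floordiv_eq_ediv_of_pos (by omega),
        PySem.Int.floordiv_eq_ediv_of_pos (by omega)]
    have h : (c + 1) * (c + 1 - 1) = c * (c - 1) + c * 2 := by ring
    rw [h, Int.add_mul_ediv_right _ _ (by omega)]

lemma sum_map_update (k : Int) (f g : Int → Int) :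
    ∀ (s : List Int), s.Nodup → k ∈ s → (∀ x ∈ s, x ≠ k → g x = f x) →
      (s.map g).sum = (s.map f).sum + (g k - f k) := by
  intro s
  induction s with
  | nil => intro _ hk; simp at hk
  | cons a t ih =>
    intro hnd hk hcong
    rcases List.mem_cons.mp hk with rfl | hkt
    · have h : t.map g = t.map f := by
        apply List.map_congr_left
        intro x hx
        refine hcong x (List.mem_cons_of_mem _ hx) ?_
        intro he; exact (List.nodup_cons.mp hnd).1 (he ▸ hx)
      simp [h]; ring
    · have ha : g a = f a := by
        refine hcong a List.mem_cons_self ?_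
        intro he; exact (List.nodup_cons.mp hnd).1 (he ▸ hkt)
      have h := ih (List.nodup_cons.mp hnd).2 hkt (fun x hx => hcong x (List.mem_cons_of_mem _ hx))
      simp [ha, h]; ring

lemma pvT_append (ks : List Int) (k : Int) :
    pvT (ks ++ [k]) = pvT ks + (ks.count k : Int) := by
  have hset : PySem.Set.ofList (ks ++ [k]) = PySem.Set.add (PySem.Set.ofList ks) k := by
    rw [PySem.Set.ofList_append]; rfl
  have hcount : ∀ x : Int, x ≠ k → ((ks ++ [k]).count x) = ks.count x := by
    intro x hx
    simp [List.count_append, List.count_singleton]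
    exact fun h => hx h.symm
  have hcountk : ((ks ++ [k]).count k) = ks.count k + 1 := by
    simp [List.count_append]
  by_cases hk : k ∈ ks
  · have hconts : (PySem.Set.ofList ks).contains k = true :=
      (PySem.Set.contains_iff _ _).mpr ((PySem.Set.mem_ofList ks k).mpr hk)
    unfold pvT
    rw [hset, PySem.Set.add, if_pos hconts]
    rw [sum_map_update k (fun k' => pvC2 ((ks.count k' : Int)))
          (fun k' => pvC2 (((ks ++ [k]).count k' : Int)))
          (PySem.Set.ofList ks) (PySem.Set.nodup_ofList ks)
          ((PySem.Set.mem_ofList ks k).mpr hk)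
          (fun x _ hx => by simp only [hcount x hx])]
    have hc1 : (1 : Int) ≤ (ks.count k : Int) := by
      exact_mod_cast List.one_le_count_iff.mpr hk
    rw [hcountk]
    push_cast
    rw [pvC2_succ _ hc1]
    ring
  · have hconts : (PySem.Set.ofList ks).contains k = false := by
      rw [Bool.eq_false_iff]
      intro hc
      exact hk ((PySem.Set.mem_ofList ks k).mp ((PySem.Set.contains_iff _ _).mp hc))
    unfold pvT
    rw [hset, PySem.Set.add, if_neg (by rw [hconts]; exact Bool.false_ne_true)]
    rw [List.map_append, List.sum_append]
    have h0 : ks.count k = 0 := List.count_eq_zero.mpr hk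
    have hrest : (PySem.Set.ofList ks).map (fun k' => pvC2 (((ks ++ [k]).count k' : Int)))
        = (PySem.Set.ofList ks).map (fun k' => pvC2 ((ks.count k' : Int))) := by
      apply List.map_congr_left
      intro x hx
      have hxk : x ≠ k := fun h => hk (h ▸ (PySem.Set.mem_ofList ks x).mp hx)
      rw [hcount x hxk]
    rw [hrest]
    simp [h0, pvC2]

-- B's paired fold: the dict component ignores the running total
lemma pvB_fst (ks : List Int) :
    ∀ (d : PySem.Dict Int Int) (t : Int),
      (ks.foldl pvStepB (d, t)).1
      = ks.foldl (fun d k => d.insert k (d.getD k 0 + 1)) d := by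
  induction ks with
  | nil => intro d t; rfl
  | cons a t ih => intro d t'; simp only [List.foldl_cons]; exact ih _ _

lemma pvB_snd (ks : List Int) :
    (ks.foldl pvStepB (PySem.Dict.empty, 0)).2 = pvT ks := by
  induction ks using List.reverseRecOn with
  | nil => rfl
  | append_singleton ks k ih =>
    rw [List.foldl_append]
    simp only [List.foldl_cons, List.foldl_nil, pvStepB]
    rw [ih, pvB_fst, PySem.Dict.getD_foldl_insert_add_one, PySem.Dict.getD_empty,
        pvT_append]
    ring

-- A's dict loop is the Counter loop
lemma pvA_dict (ks : List Int) :
    ks.foldl pvStepA PySem.Dict.empty = PySem.Dict.counter ks := by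
  rw [PySem.Dict.counter_eq_foldl]
  apply PySem.List.foldl_congr_mem
  intro d k _
  unfold pvStepA
  by_cases h : d.contains k = true
  · simp [h, PySem.Dict.modify]
  · simp only [Bool.not_eq_true] at h
    simp [h, PySem.Dict.modify, PySem.Dict.getD_of_not_contains d 0 h]

lemma pvA_eq (nums : List Int) :
    countNicePairs nums = PySem.Int.mod (pvT (nums.map pvRevKey)) (10 ^ 9 + 7) := by
  unfold countNicePairs
  rw [← List.foldl_map, pvA_dict]
  have hvals : (PySem.Dict.counter (nums.map pvRevKey)).values
      = (PySem.Set.ofList (nums.map pvRevKey)).map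
          (fun k => ((nums.map pvRevKey).count k : Int)) := by
    show (PySem.Dict.counter (nums.map pvRevKey)).items.map (·.2) = _
    rw [PySem.Dict.items_counter]
    simp [List.map_map, Function.comp]
  rw [hvals]
  have hsum : ∀ (l : List Int),
      l.foldl (fun count v => if v > 1 then count + PySem.Int.floordiv (v * (v - 1)) 2 else count) 0
      = (l.map pvC2).sum := by
    intro l
    have hcg : ∀ (acc : Int), ∀ x ∈ l,
        (fun count v => if v > 1 then count + PySem.Int.floordiv (v * (v - 1)) 2 else count) acc x
        = (fun count v => count + pvC2 v) acc x := by
      intro acc x _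
      show (if x > 1 then acc + PySem.Int.floordiv (x * (x - 1)) 2 else acc)
          = acc + pvC2 x
      unfold pvC2
      split_ifs with hv
      · rfl
      · ring
    rw [PySem.List.foldl_congr_mem l _ _ 0 hcg, PySem.List.foldl_add l pvC2 0, zero_add]
  rw [hsum]
  unfold pvT
  rw [List.map_map]
  rfl

lemma pvB_eq (nums : List Int) :
    countNicePairs_alt nums = PySem.Int.mod (pvT (nums.map pvRevKey)) (10 ^ 9 + 7) := by
  unfold countNicePairs_alt
  rw [← List.foldl_map, pvB_snd]

-- ===== VERDICT (by name: the statement is the Claim_ definition above) =====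
theorem countNicePairs_spec : Claim_equal_countNicePairs := by
  intro nums _ _
  unfold Spec_countNicePairs
  rw [pvA_eq, pvB_eq]
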